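-- pv_equiv track=rewrite | github.com/blaine-t-bush/advent-of-code | 2015/day3.py | get_visited_coords
-- ===== SOURCE A (Python) =====
-- def get_visited_coords(instructions):
--     coords = [(0, 0)]
--     for instruction in instructions:
--         match instruction:
--             case ">":
--                 coords.append((coords[-1][0] + 1, coords[-1][1]))
--             case "<":
--                 coords.append((coords[-1][0] - 1, coords[-1][1]))
--             case "^":
--                 coords.append((coords[-1][0], coords[-1][1] + 1))
--             case "v":
--                 coords.append((coords[-1][0], coords[-1][1] - 1))
--             case _:
--                 raise ValueError(
--                     f'Expected instruction ">", "<", "^", or "v", received {instruction}'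
--                 )
--     return coords
-- ===== SOURCE B (Python) =====
-- def get_visited_coords(instructions):
--     # Position = signed histogram of the instruction prefix:
--     # x = #'>' - #'<' seen so far, y = #'^' - #'v' seen so far.
--     # The previous coordinate is never read; each point is derived
--     # from the symbol counts alone.
--     counts = {">": 0, "<": 0, "^": 0, "v": 0}
--     coords = [(0, 0)]
--     for instruction in instructions:
--         if instruction not in counts:
--             raise ValueError(
--                 f'Expected instruction ">", "<", "^", or "v", received {instruction}'
--             )
--         counts[instruction] += 1
--         coords.append((counts[">"] - counts["<"], counts["^"] - counts["v"]))
--     return coords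
-- ===== Notes on version B (the rewrite author's own statement) =====
-- stated objective: alternative
-- what changed: B never reads the previous coordinate: it maintains a histogram of the four symbols and emits each point as the signed count differences (#'>'-#'<', #'^'-#'v') of the prefix, instead of A's last-coordinate-plus-delta match.
import Mathlib
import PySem

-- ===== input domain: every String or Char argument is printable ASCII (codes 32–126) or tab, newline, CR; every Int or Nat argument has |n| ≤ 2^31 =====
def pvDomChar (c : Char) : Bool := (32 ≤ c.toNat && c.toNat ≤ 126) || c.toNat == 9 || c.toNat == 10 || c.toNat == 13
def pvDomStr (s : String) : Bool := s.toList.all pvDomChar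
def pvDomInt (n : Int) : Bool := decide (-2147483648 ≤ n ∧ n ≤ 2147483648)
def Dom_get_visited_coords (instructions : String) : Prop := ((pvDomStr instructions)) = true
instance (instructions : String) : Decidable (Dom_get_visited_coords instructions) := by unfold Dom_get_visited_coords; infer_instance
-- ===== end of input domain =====

-- B derives each point from a running histogram of the four symbols
-- (x = #'>' - #'<', y = #'^' - #'v') instead of A's last-coordinate-plus-delta
-- match (alternative algorithm, same O(n) cost).

-- ===== PORT A =====
-- A's loop body: append successor of the last coordinate; on a char that is not
-- one of ><^v Python raises ValueError — those inputs are outside Pre_ (here the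
-- fold leaves the list unchanged, nothing is claimed there).
def pvStepA (coords : List (Int × Int)) (c : Char) : List (Int × Int) :=
  let last := coords.getLastD (0, 0)
  if c = '>' then coords ++ [(last.1 + 1, last.2)]
  else if c = '<' then coords ++ [(last.1 - 1, last.2)]
  else if c = '^' then coords ++ [(last.1, last.2 + 1)]
  else if c = 'v' then coords ++ [(last.1, last.2 - 1)]
  else coords

def get_visited_coords (instructions : String) : List (Int × Int) :=
  instructions.toList.foldl pvStepA [(0, 0)]

-- ===== PORT B =====
-- state: the counts dict {'>': r, '<': l, '^': u, 'v': d} as a 4-tuple, and the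
-- output list; a char not in the dict raises ValueError in Python (outside Pre_,
-- here the state is left unchanged, nothing is claimed there).
def pvStepB (st : (Int × Int × Int × Int) × List (Int × Int)) (c : Char) :
    (Int × Int × Int × Int) × List (Int × Int) :=
  let cnt := st.1
  if c = '>' then
    let cnt' := (cnt.1 + 1, cnt.2.1, cnt.2.2.1, cnt.2.2.2)
    (cnt', st.2 ++ [(cnt'.1 - cnt'.2.1, cnt'.2.2.1 - cnt'.2.2.2)])
  else if c = '<' then
    let cnt' := (cnt.1, cnt.2.1 + 1, cnt.2.2.1, cnt.2.2.2)
    (cnt', st.2 ++ [(cnt'.1 - cnt'.2.1, cnt'.2.2.1 - cnt'.2.2.2)])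
  else if c = '^' then
    let cnt' := (cnt.1, cnt.2.1, cnt.2.2.1 + 1, cnt.2.2.2)
    (cnt', st.2 ++ [(cnt'.1 - cnt'.2.1, cnt'.2.2.1 - cnt'.2.2.2)])
  else if c = 'v' then
    let cnt' := (cnt.1, cnt.2.1, cnt.2.2.1, cnt.2.2.2 + 1)
    (cnt', st.2 ++ [(cnt'.1 - cnt'.2.1, cnt'.2.2.1 - cnt'.2.2.2)])
  else st

def get_visited_coords_alt (instructions : String) : List (Int × Int) :=
  (instructions.toList.foldl pvStepB ((0, 0, 0, 0), [(0, 0)])).2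

-- ===== PRECONDITION & SPEC =====
-- Pre_ excludes exactly the strings containing a character other than > < ^ v,
-- on which Python A (and B) raise ValueError.
def Pre_get_visited_coords (instructions : String) : Prop :=
  (instructions.toList.all (fun c => c = '>' ∨ c = '<' ∨ c = '^' ∨ c = 'v')) = true
instance (instructions : String) : Decidable (Pre_get_visited_coords instructions) := by
  unfold Pre_get_visited_coords; infer_instance
def pvWitness_get_visited_coords : String := "><^v>"

def Spec_get_visited_coords (instructions : String) (out : List (Int × Int)) : Prop :=
  out = get_visited_coords_alt instructions
instance (instructions : String) (out : List (Int × Int)) :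
    Decidable (Spec_get_visited_coords instructions out) := by
  unfold Spec_get_visited_coords; infer_instance

-- ===== CLAIM (what is proved, stated in full; the proofs are below) =====
def Claim_equal_get_visited_coords : Prop :=
  ∀ (instructions : String), Dom_get_visited_coords instructions →
    Pre_get_visited_coords instructions →
    Spec_get_visited_coords instructions (get_visited_coords instructions)

-- ===== LEMMAS AND PROOFS =====
-- invariant: the last coordinate A carries equals the signed count differences
-- of B's histogram; then both folds extend the same list by the same point.
lemma pv_key (cs : List Char) (cnt : Int × Int × Int × Int) (coords : List (Int × Int))
    (h : ∀ c ∈ cs, c = '>' ∨ c = '<' ∨ c = '^' ∨ c = 'v')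
    (hl : coords.getLastD (0, 0) = (cnt.1 - cnt.2.1, cnt.2.2.1 - cnt.2.2.2)) :
    cs.foldl pvStepA coords = (cs.foldl pvStepB (cnt, coords)).2 := by
  induction cs generalizing cnt coords with
  | nil => simp
  | cons c cs ih =>
    have hrest : ∀ x ∈ cs, x = '>' ∨ x = '<' ∨ x = '^' ∨ x = 'v' :=
      fun x hx => h x (List.mem_cons_of_mem _ hx)
    rcases h c (List.mem_cons_self ..) with rfl | rfl | rfl | rfl <;>
        simp only [List.foldl_cons, pvStepA, pvStepB, Char.reduceEq, reduceIte, hl]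
    · rw [show ((cnt.1 : Int) - cnt.2.1 + 1, cnt.2.2.1 - cnt.2.2.2)
            = ((cnt.1 + 1 - cnt.2.1, cnt.2.2.1 - cnt.2.2.2) : Int × Int) by
          rw [Prod.mk.injEq]; constructor <;> ring]
      exact ih _ _ hrest (by simp)
    · rw [show ((cnt.1 : Int) - cnt.2.1 - 1, cnt.2.2.1 - cnt.2.2.2)
            = ((cnt.1 - (cnt.2.1 + 1), cnt.2.2.1 - cnt.2.2.2) : Int × Int) by
          rw [Prod.mk.injEq]; constructor <;> ring]
      exact ih _ _ hrest (by simp)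
    · rw [show ((cnt.1 : Int) - cnt.2.1, cnt.2.2.1 - cnt.2.2.2 + 1)
            = ((cnt.1 - cnt.2.1, cnt.2.2.1 + 1 - cnt.2.2.2) : Int × Int) by
          rw [Prod.mk.injEq]; constructor <;> ring]
      exact ih _ _ hrest (by simp)
    · rw [show ((cnt.1 : Int) - cnt.2.1, cnt.2.2.1 - cnt.2.2.2 - 1)
            = ((cnt.1 - cnt.2.1, cnt.2.2.1 - (cnt.2.2.2 + 1)) : Int × Int) by
          rw [Prod.mk.injEq]; constructor <;> ring]
      exact ih _ _ hrest (by simp)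

theorem pv_main (instructions : String)
    (hp : Pre_get_visited_coords instructions) :
    get_visited_coords instructions = get_visited_coords_alt instructions := by
  unfold get_visited_coords get_visited_coords_alt
  exact pv_key instructions.toList (0, 0, 0, 0) [(0, 0)]
    (by simpa [Pre_get_visited_coords, List.all_eq_true] using hp) rfl

-- ===== VERDICT (by name: the statement is the Claim_ definition above) =====
theorem get_visited_coords_spec : Claim_equal_get_visited_coords :=
  fun instructions _ hp => pv_main instructions hp
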